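-- pv_equiv track=rewrite | github.com/Eguakun/python_dsa_and_problems | algorithms_and_algorithmic_techniques/greedy_algorithms/valid_starting_city/valid_starting_city_greedy.py | validStartingCity
-- ===== SOURCE A (Python) =====
-- def validStartingCity(distances, fuel, mpg):
--     numberOfCities = len(distances) # define variables
--     milesRemaining = 0
--
--     indexOfStartingCityCandidate = 0 # keep track of city we are currently considering to be starting city
--     milesRemainingAtStartingCityCandidate = 0
--
--     for cityIdx in range(1, numberOfCities): # loop through
--         distanceFromPreviousCity = distances[cityIdx - 1]
--         fuelFromPreviousCity = fuel[cityIdx - 1]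
--         milesRemaining += fuelFromPreviousCity * mpg - distanceFromPreviousCity
--
--         if milesRemaining < milesRemainingAtStartingCityCandidate: # if we find a city with less gas, we update the varibales
--             milesRemainingAtStartingCityCandidate = milesRemaining
--             indexOfStartingCityCandidate = cityIdx
--
--     return indexOfStartingCityCandidate # if we find a city with minimum number of gas, return that
-- ===== SOURCE B (Python) =====
-- def validStartingCity(distances, fuel, mpg):
--     p = [0]
--     for i in range(len(distances) - 1):
--         p.append(p[-1] + fuel[i] * mpg - distances[i])
--     return p.index(min(p))
-- ===== Notes on version B (the rewrite author's own statement) =====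
-- stated objective: alternative
-- what changed: Replaces A's single-pass greedy candidate update with an explicit prefix-sum table of net miles followed by an argmin (p.index(min(p))), i.e. table-build + library argmin instead of an on-line best-so-far loop.
import Mathlib
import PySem

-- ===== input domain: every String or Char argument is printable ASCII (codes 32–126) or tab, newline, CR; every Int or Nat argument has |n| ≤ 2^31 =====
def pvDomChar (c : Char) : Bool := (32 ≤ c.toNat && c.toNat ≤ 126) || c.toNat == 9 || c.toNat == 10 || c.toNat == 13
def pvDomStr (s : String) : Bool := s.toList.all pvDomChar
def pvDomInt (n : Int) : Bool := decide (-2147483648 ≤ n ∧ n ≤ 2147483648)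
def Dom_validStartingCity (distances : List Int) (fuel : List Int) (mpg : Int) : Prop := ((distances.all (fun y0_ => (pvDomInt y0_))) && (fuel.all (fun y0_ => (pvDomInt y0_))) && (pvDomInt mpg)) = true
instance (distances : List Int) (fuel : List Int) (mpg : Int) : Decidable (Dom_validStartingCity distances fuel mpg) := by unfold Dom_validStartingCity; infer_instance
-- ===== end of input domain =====

-- B replaces A's on-line greedy best-so-far update with an explicit prefix-sum table
-- of net miles followed by an argmin (p.index(min(p))); same cost, different decomposition.


-- ===== PORT A =====
def validStartingCity (distances : List Int) (fuel : List Int) (mpg : Int) : Int :=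
  let numberOfCities : Int := distances.length
  -- state = (milesRemaining, indexOfStartingCityCandidate, milesRemainingAtStartingCityCandidate)
  let st := (PySem.List.pyRange 1 numberOfCities 1).foldl
    (fun (s : Int × Int × Int) cityIdx =>
      let distanceFromPreviousCity := PySem.List.pyGetD distances (cityIdx - 1) 0
      let fuelFromPreviousCity := PySem.List.pyGetD fuel (cityIdx - 1) 0
      let milesRemaining := s.1 + fuelFromPreviousCity * mpg - distanceFromPreviousCity
      if milesRemaining < s.2.2 then (milesRemaining, cityIdx, milesRemaining)
      else (milesRemaining, s.2.1, s.2.2))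
    (0, 0, 0)
  st.2.1

-- ===== PORT B =====
def validStartingCity_alt (distances : List Int) (fuel : List Int) (mpg : Int) : Int :=
  let p := (PySem.List.pyRange 0 ((distances.length : Int) - 1) 1).foldl
    (fun q i =>
      q ++ [PySem.List.pyGetD q (-1) 0 + PySem.List.pyGetD fuel i 0 * mpg - PySem.List.pyGetD distances i 0])
    [0]
  ((PySem.List.index? p ((PySem.List.min? p (fun x => x)).getD 0)).getD 0 : Int)

-- ===== PRECONDITION & SPEC =====
-- A (and B) raise IndexError when fuel has fewer than len(distances)-1 entries; excluded here.
def Pre_validStartingCity (distances : List Int) (fuel : List Int) (mpg : Int) : Prop :=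
  distances.length ≤ fuel.length + 1
instance (distances : List Int) (fuel : List Int) (mpg : Int) : Decidable (Pre_validStartingCity distances fuel mpg) := by unfold Pre_validStartingCity; infer_instance
def pvWitness_validStartingCity : List Int × List Int × Int := ([3, 2, 1], [1, 1, 1], 2)

def Spec_validStartingCity (distances : List Int) (fuel : List Int) (mpg : Int) (out : Int) : Prop := out = validStartingCity_alt distances fuel mpg
instance (distances : List Int) (fuel : List Int) (mpg : Int) (out : Int) : Decidable (Spec_validStartingCity distances fuel mpg out) := by unfold Spec_validStartingCity; infer_instance

-- ===== CLAIM (what is proved, stated in full; the proofs are below) =====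
def Claim_equal_validStartingCity : Prop := ∀ (distances : List Int) (fuel : List Int) (mpg : Int), Dom_validStartingCity distances fuel mpg → Pre_validStartingCity distances fuel mpg → Spec_validStartingCity distances fuel mpg (validStartingCity distances fuel mpg)

-- ===== LEMMAS AND PROOFS =====

-- first-argmin scan: index i of the head of the remaining list, (best index, best value) accumulator
def pvG (i best v : Int) : List Int → Int × Int
  | [] => (best, v)
  | x :: xs => if x < v then pvG (i + 1) i x xs else pvG (i + 1) best v xs

-- running prefix sums starting from r (exclusive of r itself)
def pvPf (r : Int) : List Int → List Int
  | [] => []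
  | x :: xs => (r + x) :: pvPf (r + x) xs

theorem pvFoldlMin_le (l : List Int) (v : Int) : l.foldl min v ≤ v := by
  induction l generalizing v with
  | nil => simp
  | cons x xs ih => exact le_trans (ih (min v x)) (min_le_left v x)

theorem pvFoldlMin_mem (l : List Int) (v : Int) : l.foldl min v = v ∨ l.foldl min v ∈ l := by
  induction l generalizing v with
  | nil => simp
  | cons x xs ih =>
    rcases ih (min v x) with h | h
    · by_cases hvx : v ≤ x
      · left; simpa [min_eq_left hvx] using h
      · right
        rw [min_eq_right (le_of_not_ge hvx)] at h
        simp [List.foldl, min_eq_right (le_of_not_ge hvx), h]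
    · right; simp [List.foldl, h]

-- A's loop over the net list (with running sum) computes the first-argmin scan on the prefix sums
theorem pvG_spec (q : List Int) (i best v : Int) :
    (pvG i best v q).1 =
      if q.foldl min v < v then i + ((PySem.List.index? q (q.foldl min v)).getD 0 : Int) else best := by
  induction q generalizing i best v with
  | nil => simp [pvG]
  | cons x xs ih =>
    by_cases hx : x < v
    · have hm : (x :: xs).foldl min v = xs.foldl min x := by simp [List.foldl, min_eq_right hx.le]
      have hle : xs.foldl min x ≤ x := pvFoldlMin_le xs x
      have hlt : (x :: xs).foldl min v < v := by rw [hm]; exact lt_of_le_of_lt hle hx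
      rw [pvG, if_pos hx, ih, if_pos hlt, hm]
      by_cases h2 : xs.foldl min x < x
      · rw [if_pos h2]
        have hne : x ≠ xs.foldl min x := by omega
        have hmem : xs.foldl min x ∈ xs := by
          rcases pvFoldlMin_mem xs x with h | h
          · omega
          · exact h
        obtain ⟨k, hk⟩ := Option.isSome_iff_exists.mp ((PySem.List.index?_isSome_iff xs (xs.foldl min x)).mpr hmem)
        rw [PySem.List.index?_cons_of_ne _ hne, hk]
        simp only [Option.map_some, Option.getD_some]
        push_cast; ring
      · rw [if_neg h2]
        have hxeq : xs.foldl min x = x := le_antisymm hle (not_lt.mp h2)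
        rw [hxeq, PySem.List.index?_cons_self]
        simp
    · have hvx : v ≤ x := not_lt.mp hx
      have hm : (x :: xs).foldl min v = xs.foldl min v := by simp [List.foldl, min_eq_left hvx]
      rw [pvG, if_neg hx, ih, hm]
      by_cases h2 : xs.foldl min v < v
      · rw [if_pos h2, if_pos h2]
        have hne : x ≠ xs.foldl min v := by omega
        have hmem : xs.foldl min v ∈ xs := by
          rcases pvFoldlMin_mem xs v with h | h
          · omega
          · exact h
        obtain ⟨k, hk⟩ := Option.isSome_iff_exists.mp ((PySem.List.index?_isSome_iff xs (xs.foldl min v)).mpr hmem)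
        rw [PySem.List.index?_cons_of_ne _ hne, hk]
        simp only [Option.map_some, Option.getD_some]
        push_cast; ring
      · rw [if_neg h2, if_neg h2]

-- A's fold over range(a, b) equals the scan pvG over the prefix sums of the nets
theorem pvA_fold (distances fuel : List Int) (mpg : Int) :
    ∀ (a b : Int) (r best v : Int),
      ((PySem.List.pyRange a b 1).foldl
        (fun (s : Int × Int × Int) cityIdx =>
          let d := PySem.List.pyGetD distances (cityIdx - 1) 0
          let f := PySem.List.pyGetD fuel (cityIdx - 1) 0
          let m := s.1 + f * mpg - d
          if m < s.2.2 then (m, cityIdx, m) else (m, s.2.1, s.2.2))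
        (r, best, v)).2 =
      pvG a best v (pvPf r ((PySem.List.pyRange a b 1).map
        (fun i => PySem.List.pyGetD fuel (i - 1) 0 * mpg - PySem.List.pyGetD distances (i - 1) 0))) := by
  intro a b
  by_cases hab : a < b
  · intro r best v
    rw [PySem.List.pyRange_one_cons hab]
    have := pvA_fold distances fuel mpg (a + 1) b
    simp only [List.foldl_cons, List.map_cons]
    rw [pvPf]
    by_cases hc : r + PySem.List.pyGetD fuel (a - 1) 0 * mpg - PySem.List.pyGetD distances (a - 1) 0 < v
    · have harith : r + (PySem.List.pyGetD fuel (a - 1) 0 * mpg - PySem.List.pyGetD distances (a - 1) 0)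
          = r + PySem.List.pyGetD fuel (a - 1) 0 * mpg - PySem.List.pyGetD distances (a - 1) 0 := by ring
      rw [pvG, harith, if_pos hc]
      simp only [if_pos hc]
      rw [this]
    · have harith : r + (PySem.List.pyGetD fuel (a - 1) 0 * mpg - PySem.List.pyGetD distances (a - 1) 0)
          = r + PySem.List.pyGetD fuel (a - 1) 0 * mpg - PySem.List.pyGetD distances (a - 1) 0 := by ring
      rw [pvG, harith, if_neg hc]
      simp only [if_neg hc]
      rw [this]
  · intro r best v
    rw [PySem.List.pyRange_one_eq_nil (not_lt.mp hab)]
    simp [pvG, pvPf]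
termination_by a b => (b - a).toNat
decreasing_by omega

-- B's table-building fold appends exactly the prefix sums of the nets
theorem pvB_fold (distances fuel : List Int) (mpg : Int) :
    ∀ (a b : Int) (p : List Int) (r : Int), p.getLast? = some r →
      (PySem.List.pyRange a b 1).foldl
        (fun q i =>
          q ++ [PySem.List.pyGetD q (-1) 0 + PySem.List.pyGetD fuel i 0 * mpg - PySem.List.pyGetD distances i 0])
        p =
      p ++ pvPf r ((PySem.List.pyRange a b 1).map
        (fun i => PySem.List.pyGetD fuel i 0 * mpg - PySem.List.pyGetD distances i 0)) := by
  intro a b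
  by_cases hab : a < b
  · intro p r hr
    rw [PySem.List.pyRange_one_cons hab]
    simp only [List.foldl_cons, List.map_cons]
    rw [pvPf]
    have hlast : PySem.List.pyGetD p (-1) 0 = r := by
      simp [PySem.List.pyGetD, PySem.List.pyGet?_neg_one, hr]
    have hstep : p ++ [PySem.List.pyGetD p (-1) 0 + PySem.List.pyGetD fuel a 0 * mpg - PySem.List.pyGetD distances a 0]
        = p ++ [r + (PySem.List.pyGetD fuel a 0 * mpg - PySem.List.pyGetD distances a 0)] := by
      rw [hlast]; ring_nf
    rw [hstep, pvB_fold distances fuel mpg (a + 1) b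
        (p ++ [r + (PySem.List.pyGetD fuel a 0 * mpg - PySem.List.pyGetD distances a 0)])
        (r + (PySem.List.pyGetD fuel a 0 * mpg - PySem.List.pyGetD distances a 0))
        (by simp)]
    simp
  · intro p r hr
    rw [PySem.List.pyRange_one_eq_nil (not_lt.mp hab)]
    simp [pvPf]
termination_by a b => (b - a).toNat
decreasing_by omega

-- glue: first-argmin scan from (1, 0, 0) over q equals (0 :: q).index(min(0 :: q))
theorem pvGlue (q : List Int) :
    (pvG 1 0 0 q).1 =
      ((PySem.List.index? (0 :: q) ((PySem.List.min? (0 :: q) (fun x => x)).getD 0)).getD 0 : Int) := by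
  rw [pvG_spec, PySem.List.min?_id_cons]
  simp only [Option.getD_some]
  by_cases h : q.foldl min 0 < 0
  · rw [if_pos h]
    have hne : (0 : Int) ≠ q.foldl min 0 := by omega
    have hmem : q.foldl min 0 ∈ q := by
      rcases pvFoldlMin_mem q 0 with h' | h'
      · omega
      · exact h'
    obtain ⟨k, hk⟩ := Option.isSome_iff_exists.mp ((PySem.List.index?_isSome_iff q (q.foldl min 0)).mpr hmem)
    rw [PySem.List.index?_cons_of_ne _ hne, hk]
    simp only [Option.map_some, Option.getD_some]
    push_cast; ring
  · rw [if_neg h]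
    have h0 : q.foldl min 0 = 0 := le_antisymm (pvFoldlMin_le q 0) (not_lt.mp h)
    rw [h0, PySem.List.index?_cons_self]
    simp

-- the two net lists (A indexes cityIdx-1 over range(1,n), B indexes i over range(0,n-1)) coincide
theorem pvNets_eq (distances fuel : List Int) (mpg : Int) :
    (PySem.List.pyRange 1 (distances.length : Int) 1).map
      (fun i => PySem.List.pyGetD fuel (i - 1) 0 * mpg - PySem.List.pyGetD distances (i - 1) 0) =
    (PySem.List.pyRange 0 ((distances.length : Int) - 1) 1).map
      (fun i => PySem.List.pyGetD fuel i 0 * mpg - PySem.List.pyGetD distances i 0) := by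
  rw [PySem.List.pyRange_one, PySem.List.pyRange_one]
  simp only [List.map_map]
  have : ((distances.length : Int) - 1).toNat = ((distances.length : Int) - 1 - 0).toNat := by omega
  rw [← this]
  apply List.map_congr_left
  intro k _
  simp only [Function.comp]
  norm_num

-- ===== VERDICT (by name: the statement is the Claim_ definition above) =====
theorem validStartingCity_spec : Claim_equal_validStartingCity := by
  intro distances fuel mpg _ _
  unfold Spec_validStartingCity validStartingCity validStartingCity_alt
  rw [pvB_fold distances fuel mpg 0 ((distances.length : Int) - 1) [0] 0 (by simp)]
  have hA := pvA_fold distances fuel mpg 1 (distances.length : Int) 0 0 0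
  simp only at hA ⊢
  rw [hA, pvNets_eq]
  exact pvGlue _
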